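-- pv_equiv track=rewrite | github.com/Stephen-Kennedy/atlas_transform | build/lib/atlas/transform.py | remove_checkbox_prefix
-- ===== SOURCE A (Python) =====
-- def remove_checkbox_prefix(line: str) -> str:
--     """Remove leading task checkbox markup like '- [ ] ' or '- [x] '."""
--     s = line.lstrip()
--     for prefix in ('- [ ] ', '- [x] ', '- [X] ', '* [ ] ', '* [x] ', '* [X] '):
--         if s.startswith(prefix):
--             return s[len(prefix):]
--     for prefix in ('- [ ]', '- [x]', '- [X]', '* [ ]', '* [x]', '* [X]'):
--         if s.startswith(prefix):
--             rest = s[len(prefix):]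
--             return rest.lstrip()
--     return s
-- ===== SOURCE B (Python) =====
-- def remove_checkbox_prefix(line: str) -> str:
--     """Remove leading task checkbox markup like '- [ ] ' or '- [x] '."""
--     s = line.lstrip()
--     if s[:1] in '-*' and s[1:3] == ' [' and s[3:4] in ' xX' and s[4:5] == ']':
--         rest = s[5:]
--         if rest[:1] == ' ':
--             return rest[1:]
--         return rest.lstrip()
--     return s
-- ===== Notes on version B (the rewrite author's own statement) =====
-- stated objective: simpler
-- what changed: Replaces A's two six-element prefix lists scanned by two loops with a single five-character marker check via slices plus one branch on whether a space follows the marker.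
import Mathlib
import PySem

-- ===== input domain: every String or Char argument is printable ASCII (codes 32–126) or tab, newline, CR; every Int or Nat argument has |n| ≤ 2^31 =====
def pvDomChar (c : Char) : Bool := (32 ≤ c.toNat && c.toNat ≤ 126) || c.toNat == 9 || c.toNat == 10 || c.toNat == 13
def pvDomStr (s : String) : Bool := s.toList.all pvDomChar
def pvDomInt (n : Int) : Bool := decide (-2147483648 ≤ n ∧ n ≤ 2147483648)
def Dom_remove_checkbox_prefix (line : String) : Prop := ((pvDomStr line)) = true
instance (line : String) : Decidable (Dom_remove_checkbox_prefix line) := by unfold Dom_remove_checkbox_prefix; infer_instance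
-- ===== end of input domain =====

-- B replaces A's two six-element prefix tuples and two scanning loops by one five-character
-- marker check (via slices) plus a single branch on whether a space follows the marker (simpler).


-- ===== PORT A =====
-- first loop: 'for prefix in (…' - [ ] '…): if s.startswith(prefix): return s[len(prefix):]'
def rcpStrip1 (s : String) : List String → Option String
  | [] => none
  | p :: ps =>
    if PySem.Str.startswith s p then some (PySem.Str.slice s (some (PySem.Str.len p)) none)
    else rcpStrip1 s ps

-- second loop: 'if s.startswith(prefix): rest = s[len(prefix):]; return rest.lstrip()'
def rcpStrip2 (s : String) : List String → Option String
  | [] => none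
  | p :: ps =>
    if PySem.Str.startswith s p then
      some (PySem.Str.lstrip (PySem.Str.slice s (some (PySem.Str.len p)) none))
    else rcpStrip2 s ps

def remove_checkbox_prefix (line : String) : String :=
  let s := PySem.Str.lstrip line
  match rcpStrip1 s ["- [ ] ", "- [x] ", "- [X] ", "* [ ] ", "* [x] ", "* [X] "] with
  | some r => r
  | none =>
    match rcpStrip2 s ["- [ ]", "- [x]", "- [X]", "* [ ]", "* [x]", "* [X]"] with
    | some r => r
    | none => s

-- ===== PORT B =====
def remove_checkbox_prefix_alt (line : String) : String :=
  let s := PySem.Str.lstrip line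
  if PySem.Str.isIn (PySem.Str.slice s none (some 1)) "-*"
      && (PySem.Str.slice s (some 1) (some 3) == " [")
      && PySem.Str.isIn (PySem.Str.slice s (some 3) (some 4)) " xX"
      && (PySem.Str.slice s (some 4) (some 5) == "]") then
    let rest := PySem.Str.slice s (some 5) none
    if PySem.Str.slice rest none (some 1) == " " then PySem.Str.slice rest (some 1) none
    else PySem.Str.lstrip rest
  else s

-- ===== PRECONDITION & SPEC =====
def Spec_remove_checkbox_prefix (line : String) (out : String) : Prop := out = remove_checkbox_prefix_alt line
instance (line : String) (out : String) : Decidable (Spec_remove_checkbox_prefix line out) := by unfold Spec_remove_checkbox_prefix; infer_instance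

-- ===== CLAIM (what is proved, stated in full; the proofs are below) =====
def Claim_equal_remove_checkbox_prefix : Prop := ∀ (line : String), Dom_remove_checkbox_prefix line → Spec_remove_checkbox_prefix line (remove_checkbox_prefix line)

-- ===== LEMMAS AND PROOFS =====
theorem rcp_beq_toList (x y : String) : (x == y) = decide (x.toList = y.toList) := by
  rw [Bool.eq_iff_iff]; simp [String.toList_inj]

theorem rcp_isIn_singleton (a : Char) (x t : String) (hx : x.toList = [a]) :
    PySem.Str.isIn x t = decide (a ∈ t.toList) := by
  rw [Bool.eq_iff_iff, decide_eq_true_iff, PySem.Str.isIn_iff_infix, hx]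
  constructor
  · intro h; exact List.singleton_sublist.mp h.sublist
  · intro h
    obtain ⟨u, v, huv⟩ := List.eq_append_cons_of_mem h
    exact ⟨u, v, by rw [huv.1]; simp⟩

theorem rcp_slice_toList (s : String) (a b : Int) (ha : 0 ≤ a) (hb : 0 ≤ b) :
    (PySem.Str.slice s (some a) (some b)).toList = (s.toList.drop a.toNat).take (b.toNat - a.toNat) := by
  simp only [PySem.Str.toList_slice, PySem.Chars.slice_eq_listSlice]
  exact PySem.List.slice_toNat _ ha hb

theorem rcp_slice_take (s : String) (b : Int) (hb : 0 ≤ b) :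
    (PySem.Str.slice s none (some b)).toList = s.toList.take b.toNat := by
  simp only [PySem.Str.toList_slice, PySem.Chars.slice_eq_listSlice]
  exact PySem.List.slice_to _ hb

theorem rcp_slice_drop (s : String) (a : Int) (ha : 0 ≤ a) :
    (PySem.Str.slice s (some a) none).toList = s.toList.drop a.toNat := by
  simp only [PySem.Str.toList_slice, PySem.Chars.slice_eq_listSlice]
  exact PySem.List.slice_from _ ha


-- specialised slice computations (all bounds are the literal nonnegative numerals of the ports)
theorem rcp_sl01 (s : String) : (PySem.Str.slice s none (some 1)).toList = s.toList.take 1 := by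
  rw [rcp_slice_take s 1 (by norm_num)]; rfl

theorem rcp_sl13 (s : String) : (PySem.Str.slice s (some 1) (some 3)).toList = (s.toList.drop 1).take 2 := by
  rw [rcp_slice_toList s 1 3 (by norm_num) (by norm_num)]; rfl

theorem rcp_sl34 (s : String) : (PySem.Str.slice s (some 3) (some 4)).toList = (s.toList.drop 3).take 1 := by
  rw [rcp_slice_toList s 3 4 (by norm_num) (by norm_num)]; rfl

theorem rcp_sl45 (s : String) : (PySem.Str.slice s (some 4) (some 5)).toList = (s.toList.drop 4).take 1 := by
  rw [rcp_slice_toList s 4 5 (by norm_num) (by norm_num)]; rfl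

theorem rcp_sl5 (s : String) : (PySem.Str.slice s (some 5) none).toList = s.toList.drop 5 := by
  rw [rcp_slice_drop s 5 (by norm_num)]; rfl

theorem rcp_sl6 (s : String) : (PySem.Str.slice s (some 6) none).toList = s.toList.drop 6 := by
  rw [rcp_slice_drop s 6 (by norm_num)]; rfl

theorem rcp_drop_drop (s : String) :
    PySem.Str.slice (PySem.Str.slice s (some 5) none) (some 1) none = PySem.Str.slice s (some 6) none := by
  rw [← String.toList_inj]
  rw [rcp_slice_drop _ 1 (by norm_num), rcp_sl5, rcp_sl6]
  simp [List.drop_drop]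

theorem rcpLit1 : "- [ ] ".toList = ['-', ' ', '[', ' ', ']', ' '] := rfl
theorem rcpLit2 : "- [x] ".toList = ['-', ' ', '[', 'x', ']', ' '] := rfl
theorem rcpLit3 : "- [X] ".toList = ['-', ' ', '[', 'X', ']', ' '] := rfl
theorem rcpLit4 : "* [ ] ".toList = ['*', ' ', '[', ' ', ']', ' '] := rfl
theorem rcpLit5 : "* [x] ".toList = ['*', ' ', '[', 'x', ']', ' '] := rfl
theorem rcpLit6 : "* [X] ".toList = ['*', ' ', '[', 'X', ']', ' '] := rfl
theorem rcpLit7 : "- [ ]".toList = ['-', ' ', '[', ' ', ']'] := rfl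
theorem rcpLit8 : "- [x]".toList = ['-', ' ', '[', 'x', ']'] := rfl
theorem rcpLit9 : "- [X]".toList = ['-', ' ', '[', 'X', ']'] := rfl
theorem rcpLit10 : "* [ ]".toList = ['*', ' ', '[', ' ', ']'] := rfl
theorem rcpLit11 : "* [x]".toList = ['*', ' ', '[', 'x', ']'] := rfl
theorem rcpLit12 : "* [X]".toList = ['*', ' ', '[', 'X', ']'] := rfl
theorem rcpLit13 : "-*".toList = ['-', '*'] := rfl
theorem rcpLit14 : " [".toList = [' ', '['] := rfl
theorem rcpLit15 : " xX".toList = [' ', 'x', 'X'] := rfl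
theorem rcpLit16 : "]".toList = [']'] := rfl
theorem rcpLit17 : " ".toList = [' '] := rfl
theorem rcpLen1 : PySem.Str.len "- [ ] " = 6 := by decide
theorem rcpLen2 : PySem.Str.len "- [x] " = 6 := by decide
theorem rcpLen3 : PySem.Str.len "- [X] " = 6 := by decide
theorem rcpLen4 : PySem.Str.len "* [ ] " = 6 := by decide
theorem rcpLen5 : PySem.Str.len "* [x] " = 6 := by decide
theorem rcpLen6 : PySem.Str.len "* [X] " = 6 := by decide
theorem rcpLen7 : PySem.Str.len "- [ ]" = 5 := by decide
theorem rcpLen8 : PySem.Str.len "- [x]" = 5 := by decide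
theorem rcpLen9 : PySem.Str.len "- [X]" = 5 := by decide
theorem rcpLen10 : PySem.Str.len "* [ ]" = 5 := by decide
theorem rcpLen11 : PySem.Str.len "* [x]" = 5 := by decide
theorem rcpLen12 : PySem.Str.len "* [X]" = 5 := by decide

theorem rcp_beq_lit (x y : Char) : (x == y) = decide (y = x) := by
  by_cases h : y = x
  · simp [h]
  · simp [h, Ne.symm h]

set_option maxRecDepth 8192 in
theorem rcp_core (s : String) : remove_checkbox_prefix_alt s = remove_checkbox_prefix s := by
  unfold remove_checkbox_prefix_alt remove_checkbox_prefix
  generalize PySem.Str.lstrip s = t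
  rcases ht : t.toList with _ | ⟨a, _ | ⟨b, _ | ⟨c, _ | ⟨d, _ | ⟨e, rest⟩⟩⟩⟩⟩ <;>
    simp only [rcpStrip1, rcpStrip2, PySem.Str.startswith_eq, PySem.Chars.startswith,
      rcp_beq_toList, rcp_sl01, rcp_sl13, rcp_sl45, rcp_sl5, ht,
      rcpLit1, rcpLit2, rcpLit3, rcpLit4, rcpLit5, rcpLit6, rcpLit7, rcpLit8, rcpLit9,
      rcpLit10, rcpLit11, rcpLit12, rcpLit14, rcpLit16, rcpLit17,
      rcpLen1, rcpLen2, rcpLen3, rcpLen4, rcpLen5, rcpLen6, rcpLen7, rcpLen8, rcpLen9,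
      rcpLen10, rcpLen11, rcpLen12, List.isPrefixOf, List.drop_succ_cons, List.drop_nil,
      List.drop_zero, List.take_succ_cons, List.take_nil, List.take_zero]
  · simp
  · simp
  · simp
  · simp
  · simp
  · have h1 : PySem.Str.isIn (PySem.Str.slice t none (some 1)) "-*" = decide (a ∈ "-*".toList) :=
      rcp_isIn_singleton a _ _ (by rw [rcp_sl01, ht]; rfl)
    have h3 : PySem.Str.isIn (PySem.Str.slice t (some 3) (some 4)) " xX" = decide (d ∈ " xX".toList) :=
      rcp_isIn_singleton d _ _ (by rw [rcp_sl34, ht]; rfl)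
    rw [h1, h3]
    simp only [rcp_beq_lit, rcpLit13, rcpLit15, List.mem_cons,
      List.not_mem_nil, or_false, List.cons.injEq, and_true]
    rcases rest with _ | ⟨f, r⟩ <;>
      simp only [List.isPrefixOf, rcp_beq_lit, List.cons.injEq, and_true,
        Bool.decide_and, Bool.decide_or, Bool.and_true, Bool.and_false,
        List.take_nil, List.take_succ_cons, List.take_zero]
    · generalize decide (a = '-') = A1
      generalize decide (a = '*') = A2
      generalize decide (b = ' ') = B1
      generalize decide (c = '[') = C1
      generalize decide (d = ' ') = D1
      generalize decide (d = 'x') = D2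
      generalize decide (d = 'X') = D3
      generalize decide (e = ']') = E1
      cases A1 <;> cases A2 <;> cases B1 <;> cases C1 <;> cases D1 <;> cases D2 <;>
        cases D3 <;> cases E1 <;> rfl
    · rw [rcp_drop_drop]
      generalize decide (a = '-') = A1
      generalize decide (a = '*') = A2
      generalize decide (b = ' ') = B1
      generalize decide (c = '[') = C1
      generalize decide (d = ' ') = D1
      generalize decide (d = 'x') = D2
      generalize decide (d = 'X') = D3
      generalize decide (e = ']') = E1
      generalize decide (f = ' ') = F1
      cases A1 <;> cases A2 <;> cases B1 <;> cases C1 <;> cases D1 <;> cases D2 <;>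
        cases D3 <;> cases E1 <;> cases F1 <;> rfl

-- ===== VERDICT (by name: the statement is the Claim_ definition above) =====
theorem remove_checkbox_prefix_spec : Claim_equal_remove_checkbox_prefix := by
  intro line _
  unfold Spec_remove_checkbox_prefix
  exact (rcp_core line).symm
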